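-- pv_equiv track=rewrite | github.com/bigdata-ustc/EduNLP | examples/downstream/paper_segmentation/utils.py | get_pk
-- ===== SOURCE A (Python) =====
-- def get_pk(y_pred, y, k):
--     tag_num = len(y)
--     count = 0
--     for i in range(0, tag_num-k):
--         seg_count_y_pred = 0
--         seg_count_y = 0
--         for j in range(i, i+k):
--             seg_count_y_pred += y_pred[j]
--             seg_count_y += y[j]
--         if seg_count_y_pred != seg_count_y:
--             count += 1
--     return count
-- ===== SOURCE B (Python) =====
-- def get_pk(y_pred, y, k):
--     n = len(y)
--     if k <= 0:
--         return 0
--     # prefix sums of the per-position differences (zip truncates to the shorter list)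
--     pref = [0]
--     s = 0
--     for a, b in zip(y_pred, y):
--         s += a - b
--         pref.append(s)
--     count = 0
--     for i in range(0, n - k):
--         if pref[i + k] != pref[i]:
--             count += 1
--     return count
-- ===== Notes on version B (the rewrite author's own statement) =====
-- stated objective: faster
-- what changed: Replaced the O(n*k) recomputation of both window sums for every position by a single prefix-sum array of the per-position differences, so each window test is one O(1) comparison.
import Mathlib
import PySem

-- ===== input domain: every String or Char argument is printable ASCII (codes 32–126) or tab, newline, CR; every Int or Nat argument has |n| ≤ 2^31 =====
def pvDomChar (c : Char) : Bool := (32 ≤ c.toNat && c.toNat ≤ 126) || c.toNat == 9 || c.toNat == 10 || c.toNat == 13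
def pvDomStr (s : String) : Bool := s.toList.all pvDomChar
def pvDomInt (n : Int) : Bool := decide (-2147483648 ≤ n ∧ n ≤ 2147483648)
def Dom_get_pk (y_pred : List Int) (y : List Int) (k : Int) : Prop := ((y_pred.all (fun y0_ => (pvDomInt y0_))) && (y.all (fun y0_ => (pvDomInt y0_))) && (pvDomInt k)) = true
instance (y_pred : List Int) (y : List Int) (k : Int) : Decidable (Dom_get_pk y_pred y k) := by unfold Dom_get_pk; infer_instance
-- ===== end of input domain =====

-- B replaces A's O(n*k) window re-summation by an O(n) prefix-sum array of per-position differences.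


-- ===== PORT A =====
def get_pk (y_pred : List Int) (y : List Int) (k : Int) : Int :=
  let tag_num : Int := (y.length : Int)
  (PySem.List.pyRange 0 (tag_num - k) 1).foldl
    (fun count i =>
      let p :=
        (PySem.List.pyRange i (i + k) 1).foldl
          (fun (sc : Int × Int) j =>
            (sc.1 + PySem.List.pyGetD y_pred j 0, sc.2 + PySem.List.pyGetD y j 0))
          (0, 0)
      if p.1 ≠ p.2 then count + 1 else count)
    0

-- ===== PORT B =====
def get_pk_alt (y_pred : List Int) (y : List Int) (k : Int) : Int :=
  let n : Int := (y.length : Int)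
  if k ≤ 0 then 0
  else
    let sp : Int × List Int :=
      (y_pred.zip y).foldl
        (fun (sp : Int × List Int) ab => (sp.1 + ab.1 - ab.2, sp.2 ++ [sp.1 + ab.1 - ab.2]))
        (0, [(0 : Int)])
    let pref := sp.2
    (PySem.List.pyRange 0 (n - k) 1).foldl
      (fun count i =>
        if PySem.List.pyGetD pref (i + k) 0 ≠ PySem.List.pyGetD pref i 0 then count + 1 else count)
      0

-- ===== PRECONDITION & SPEC =====
-- A (and B) raises IndexError iff some window exists (1 ≤ k < len y) and y_pred is shorter
-- than len y - 1; Pre_ excludes exactly those inputs, i.e. exactly A's return domain.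
def Pre_get_pk (y_pred : List Int) (y : List Int) (k : Int) : Prop :=
  k < 1 ∨ (y.length : Int) ≤ k ∨ (y.length : Int) ≤ (y_pred.length : Int) + 1
instance (y_pred : List Int) (y : List Int) (k : Int) : Decidable (Pre_get_pk y_pred y k) := by
  unfold Pre_get_pk; infer_instance
def pvWitness_get_pk : List Int × List Int × Int := ([1, 0, 1, 0], [1, 0, 0, 1], 2)

def Spec_get_pk (y_pred : List Int) (y : List Int) (k : Int) (out : Int) : Prop := out = get_pk_alt y_pred y k
instance (y_pred : List Int) (y : List Int) (k : Int) (out : Int) : Decidable (Spec_get_pk y_pred y k out) := by unfold Spec_get_pk; infer_instance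

-- ===== CLAIM (what is proved, stated in full; the proofs are below) =====
def Claim_equal_get_pk : Prop := ∀ (y_pred : List Int) (y : List Int) (k : Int), Dom_get_pk y_pred y k → Pre_get_pk y_pred y k → Spec_get_pk y_pred y k (get_pk y_pred y k)

-- ===== LEMMAS AND PROOFS =====

def pvDiff (l : List (Int × Int)) : List Int := l.map (fun p => p.1 - p.2)

-- the prefix-building fold of B, characterized
theorem pvFoldB (l : List (Int × Int)) : ∀ (s0 : Int) (p0 : List Int),
    (l.foldl (fun (sp : Int × List Int) ab => (sp.1 + ab.1 - ab.2, sp.2 ++ [sp.1 + ab.1 - ab.2])) (s0, p0)).2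
      = p0 ++ (List.range l.length).map (fun t => s0 + ((pvDiff l).take (t + 1)).sum) := by
  induction l with
  | nil => intro s0 p0; simp [pvDiff]
  | cons ab l ih =>
    intro s0 p0
    simp only [List.foldl_cons]
    rw [ih]
    simp only [pvDiff, List.length_cons, List.range_succ_eq_map, List.map_cons, List.map_map,
      List.take_succ_cons, List.sum_cons, List.append_assoc, List.singleton_append]
    refine congrArg (fun zs => p0 ++ zs) ?_
    refine List.cons_eq_cons.mpr ⟨by simp [add_sub_assoc], ?_⟩
    apply List.map_congr_left
    intro t ht
    simp only [Function.comp_def]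
    rw [Nat.succ_eq_add_one]
    ring

theorem pvPref (l : List (Int × Int)) :
    (l.foldl (fun (sp : Int × List Int) ab => (sp.1 + ab.1 - ab.2, sp.2 ++ [sp.1 + ab.1 - ab.2])) (0, [(0 : Int)])).2
      = (List.range (l.length + 1)).map (fun t => ((pvDiff l).take t).sum) := by
  rw [pvFoldB]
  rw [List.range_succ_eq_map, List.map_cons, List.map_map]
  simp [Function.comp]

theorem pvPrefGet (l : List (Int × Int)) (i : Int) (h0 : 0 ≤ i) (hm : i ≤ (l.length : Int)) :
    PySem.List.pyGetD ((List.range (l.length + 1)).map (fun t => ((pvDiff l).take t).sum)) i 0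
      = ((pvDiff l).take i.toNat).sum := by
  rw [PySem.List.pyGetD_eq_getElem _ _ h0 (by simp; omega)]
  simp

theorem pvSumTakeSucc (xs : List Int) (n : Nat) (h : n < xs.length) :
    (List.take (n + 1) xs).sum = (List.take n xs).sum + xs[n] := by
  induction xs generalizing n with
  | nil => simp at h
  | cons x xs ih =>
    cases n with
    | zero => simp
    | succ n =>
      simp only [List.take_succ_cons, List.sum_cons, List.getElem_cons_succ,
        ih n (by simpa using h)]
      ring

-- A's window sum equals a difference of prefix sums
theorem pvWinsum (xs : List Int) (b : Int) (hb : b.toNat ≤ xs.length) :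
    ∀ (n : Nat) (a s0 : Int), (b - a).toNat = n → 0 ≤ a → a ≤ b →
      (PySem.List.pyRange a b 1).foldl (fun s j => s + PySem.List.pyGetD xs j 0) s0
        = s0 + ((xs.take b.toNat).sum - (xs.take a.toNat).sum) := by
  intro n
  induction n with
  | zero =>
    intro a s0 h h0 hab
    have hba : a = b := by omega
    subst hba
    rw [PySem.List.pyRange_one_eq_nil le_rfl]
    simp
  | succ n ih =>
    intro a s0 h h0 hab
    have hab' : a < b := by omega
    rw [PySem.List.pyRange_one_cons hab']
    simp only [List.foldl_cons]
    rw [ih (a + 1) _ (by omega) (by omega) (by omega)]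
    have hlt : a.toNat < xs.length := by omega
    rw [PySem.List.pyGetD_eq_getElem _ _ h0 (by omega)]
    have h1 : (a + 1).toNat = a.toNat + 1 := by omega
    rw [h1, pvSumTakeSucc xs a.toNat hlt]
    ring

theorem pvZipSum : ∀ (as bs : List Int) (t : Nat), t ≤ as.length → t ≤ bs.length →
    ((pvDiff (as.zip bs)).take t).sum = (as.take t).sum - (bs.take t).sum := by
  intro as
  induction as with
  | nil => intro bs t h1 h2; simp_all
  | cons a as ih =>
    intro bs t h1 h2
    cases bs with
    | nil => simp_all
    | cons b bs =>
      cases t with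
      | zero => simp
      | succ t =>
        simp only [pvDiff, List.zip_cons_cons, List.map_cons, List.take_succ_cons, List.sum_cons]
        rw [show ((as.zip bs).map (fun p => p.1 - p.2)) = pvDiff (as.zip bs) from rfl,
          ih bs t (by simpa using h1) (by simpa using h2)]
        ring

theorem pvFoldlConst (l : List Int) (c : Int) : l.foldl (fun c _ => c) c = c := by
  induction l generalizing c with
  | nil => rfl
  | cons x l ih => simp only [List.foldl_cons]; exact ih c

-- ===== VERDICT (by name: the statement is the Claim_ definition above) =====
theorem get_pk_spec : Claim_equal_get_pk := by
  intro y_pred y k hdom hpre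
  unfold Spec_get_pk get_pk get_pk_alt
  dsimp only
  by_cases hk : k ≤ 0
  · simp only [if_pos hk]
    refine Eq.trans (PySem.List.foldl_congr_mem _ _ (fun (c : Int) (_ : Int) => c) _ ?_)
      (pvFoldlConst _ 0)
    intro c i _
    rw [PySem.List.pyRange_one_eq_nil (show i + k ≤ i by omega)]
    simp
  · rw [if_neg hk]
    by_cases hw : (y.length : Int) - k ≤ 0
    · rw [PySem.List.pyRange_one_eq_nil hw]
      simp
    · -- main case: 1 ≤ k, at least one window, and Pre_ gives y_pred long enough
      have hlp : (y.length : Int) ≤ (y_pred.length : Int) + 1 := by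
        rcases hpre with h | h | h <;> omega
      have hm : (y_pred.zip y).length = min y_pred.length y.length := List.length_zip
      rw [pvPref]
      apply PySem.List.foldl_congr_mem
      intro c i hi
      rw [PySem.List.mem_pyRange_one] at hi
      have hik : i + k ≤ (y.length : Int) - 1 := by omega
      rw [PySem.List.foldl_prod_mk (f := fun (s : Int) j => s + PySem.List.pyGetD y_pred j 0)
        (g := fun (s : Int) j => s + PySem.List.pyGetD y j 0)]
      rw [pvWinsum y_pred (i + k) (by omega) (i + k - i).toNat i 0 rfl (by omega) (by omega)]
      rw [pvWinsum y (i + k) (by omega) (i + k - i).toNat i 0 rfl (by omega) (by omega)]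
      rw [pvPrefGet _ _ (by omega) (by rw [hm]; push_cast; omega),
        pvPrefGet _ _ (by omega) (by rw [hm]; push_cast; omega)]
      rw [pvZipSum y_pred y (i + k).toNat (by omega) (by omega),
        pvZipSum y_pred y i.toNat (by omega) (by omega)]
      simp only [zero_add]
      split_ifs with h1 h2 h2 <;> first | rfl | omega
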